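-- pv_equiv track=rewrite | github.com/stabilityandprosperityx-cloud/relova-blog | scripts/gen_batch7.py | make_desc
-- ===== SOURCE A (Python) =====
-- def make_desc(kw: str, rest: str) -> str:
--     base = f"{kw}: {rest}".strip()
--     if len(base) > 160:
--         base = base[:157].rstrip(" ,;:") + "…"
--     while len(base) < 150:
--         base += " Verify official sources."
--     if len(base) > 160:
--         base = base[:157].rstrip(" ,;:") + "…"
--     return base
-- ===== SOURCE B (Python) =====
-- def make_desc(kw: str, rest: str) -> str:
--     base = f"{kw}: {rest}".strip()
--     if len(base) > 160:
--         base = base[:157].rstrip(" ,;:") + "…"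
--     if len(base) < 150:
--         base += " Verify official sources." * (-(-(150 - len(base)) // 25))
--     if len(base) > 160:
--         base = base[:157].rstrip(" ,;:") + "…"
--     return base
-- ===== Notes on version B (the rewrite author's own statement) =====
-- stated objective: simpler
-- what changed: The pad-appending while loop is replaced by a single append of the pad repeated a closed-form ceiling count, -(-(150 - len(base)) // 25).
import Mathlib
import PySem

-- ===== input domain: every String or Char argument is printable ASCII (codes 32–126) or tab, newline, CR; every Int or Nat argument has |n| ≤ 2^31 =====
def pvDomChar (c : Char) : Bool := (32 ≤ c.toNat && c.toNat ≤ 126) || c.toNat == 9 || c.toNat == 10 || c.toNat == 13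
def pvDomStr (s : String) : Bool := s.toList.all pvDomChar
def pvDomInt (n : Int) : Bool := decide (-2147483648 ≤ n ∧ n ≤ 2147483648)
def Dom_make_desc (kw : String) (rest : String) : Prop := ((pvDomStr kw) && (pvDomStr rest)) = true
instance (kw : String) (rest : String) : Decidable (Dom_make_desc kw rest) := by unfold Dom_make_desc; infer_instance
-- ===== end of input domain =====

-- B replaces A's pad-appending while loop by a closed-form repeat count (simpler, one step instead of up to six).

-- shared helpers (these lines of Python are identical in A and B):
-- hand port of Python s.rstrip(" ,;:"): drop trailing characters from the set {' ', ',', ';', ':'} (exact)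
def pvRstripSet (cs : List Char) : List Char :=
  (cs.reverse.dropWhile (fun c => c == ' ' || c == ',' || c == ';' || c == ':')).reverse

-- base[:157].rstrip(" ,;:") + "…"
def pvTrunc (b : List Char) : List Char :=
  pvRstripSet (PySem.List.slice b none (some 157)) ++ "…".toList

-- the pad string " Verify official sources."
def pvPad : List Char := " Verify official sources.".toList

-- ===== PORT A =====
-- the while loop: while len(base) < 150: base += " Verify official sources."
def pvPadLoopA (b : List Char) : List Char :=
  if b.length < 150 then pvPadLoopA (b ++ pvPad) else b
termination_by 150 - b.length
decreasing_by simp [pvPad]; omega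

def make_desc (kw : String) (rest : String) : String :=
  let base := PySem.Chars.strip (kw.toList ++ ": ".toList ++ rest.toList)
  let b1 := if 160 < base.length then pvTrunc base else base
  let b2 := pvPadLoopA b1
  let b3 := if 160 < b2.length then pvTrunc b2 else b2
  String.ofList b3

-- ===== PORT B =====
def make_desc_alt (kw : String) (rest : String) : String :=
  let base := PySem.Chars.strip (kw.toList ++ ": ".toList ++ rest.toList)
  let b1 := if 160 < base.length then pvTrunc base else base
  -- base += " Verify official sources." * (-(-(150 - len(base)) // 25))
  let b2 := if b1.length < 150 then
      b1 ++ (List.replicate (-(PySem.Int.floordiv (-(150 - (b1.length : Int))) 25)).toNat pvPad).flatten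
    else b1
  let b3 := if 160 < b2.length then pvTrunc b2 else b2
  String.ofList b3

-- ===== PRECONDITION & SPEC =====
def Spec_make_desc (kw : String) (rest : String) (out : String) : Prop := out = make_desc_alt kw rest
instance (kw : String) (rest : String) (out : String) : Decidable (Spec_make_desc kw rest out) := by unfold Spec_make_desc; infer_instance

-- ===== CLAIM (what is proved, stated in full; the proofs are below) =====
def Claim_equal_make_desc : Prop := ∀ (kw : String) (rest : String), Dom_make_desc kw rest → Spec_make_desc kw rest (make_desc kw rest)

-- ===== LEMMAS AND PROOFS =====

-- A's while loop appends the pad exactly ⌈(150 - len)/25⌉ times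
theorem pvPadLoopA_eq (b : List Char) :
    pvPadLoopA b = b ++ (List.replicate ((150 - b.length + 24) / 25) pvPad).flatten := by
  by_cases h : b.length < 150
  · rw [pvPadLoopA, if_pos h, pvPadLoopA_eq (b ++ pvPad)]
    have hlen : (b ++ pvPad).length = b.length + 25 := by simp [pvPad]
    have hk : (150 - b.length + 24) / 25 = (150 - (b.length + 25) + 24) / 25 + 1 := by omega
    rw [hlen, hk, List.replicate_succ, List.flatten_cons, List.append_assoc]
  · rw [pvPadLoopA, if_neg h]
    have : 150 - b.length = 0 := by omega
    simp [this]
termination_by 150 - b.length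
decreasing_by simp [pvPad]; omega

-- B's closed-form count equals that ceiling
theorem pvCount_eq (L : Nat) (h : L < 150) :
    (-(PySem.Int.floordiv (-(150 - (L : Int))) 25)).toNat = (150 - L + 24) / 25 := by
  simp [PySem.Int.floordiv, Int.fdiv_eq_ediv]
  omega

theorem pvMid_eq (b : List Char) :
    pvPadLoopA b =
      (if b.length < 150 then
        b ++ (List.replicate (-(PySem.Int.floordiv (-(150 - (b.length : Int))) 25)).toNat pvPad).flatten
      else b) := by
  rw [pvPadLoopA_eq]
  split_ifs with h
  · rw [pvCount_eq b.length h]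
  · have : 150 - b.length = 0 := by omega
    simp [this]

-- ===== VERDICT (by name: the statement is the Claim_ definition above) =====
theorem make_desc_spec : Claim_equal_make_desc := by
  intro kw rest _
  unfold Spec_make_desc make_desc make_desc_alt
  simp only [pvMid_eq]
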